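-- pv_equiv track=rewrite | github.com/kooltux/kcommit-analysis-pipeline | 05_report_commits.py | _profile_coverage
-- ===== SOURCE A (Python) =====
-- def _profile_coverage(scored):
--     zero   = sum(1 for c in scored if not (c.get('matched_profiles') or []))
--     single = sum(1 for c in scored if len(c.get('matched_profiles') or []) == 1)
--     multi  = sum(1 for c in scored if len(c.get('matched_profiles') or []) > 1)
--     return {
--         'commits_matched_zero_profiles':     zero,
--         'commits_matched_one_profile':       single,
--         'commits_matched_multiple_profiles': multi,
--     }
-- ===== SOURCE B (Python) =====
-- def _profile_coverage(scored):
--     zero = single = multi = 0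
--     for c in scored:
--         n = len(c.get('matched_profiles') or [])
--         if n == 0:
--             zero += 1
--         elif n == 1:
--             single += 1
--         else:
--             multi += 1
--     return {
--         'commits_matched_zero_profiles':     zero,
--         'commits_matched_one_profile':       single,
--         'commits_matched_multiple_profiles': multi,
--     }
-- ===== Notes on version B (the rewrite author's own statement) =====
-- stated objective: simpler
-- what changed: Replaces the three separate generator-sum scans of scored with a single pass that computes each commit's profile count once and increments one of three counters.
import Mathlib
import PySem

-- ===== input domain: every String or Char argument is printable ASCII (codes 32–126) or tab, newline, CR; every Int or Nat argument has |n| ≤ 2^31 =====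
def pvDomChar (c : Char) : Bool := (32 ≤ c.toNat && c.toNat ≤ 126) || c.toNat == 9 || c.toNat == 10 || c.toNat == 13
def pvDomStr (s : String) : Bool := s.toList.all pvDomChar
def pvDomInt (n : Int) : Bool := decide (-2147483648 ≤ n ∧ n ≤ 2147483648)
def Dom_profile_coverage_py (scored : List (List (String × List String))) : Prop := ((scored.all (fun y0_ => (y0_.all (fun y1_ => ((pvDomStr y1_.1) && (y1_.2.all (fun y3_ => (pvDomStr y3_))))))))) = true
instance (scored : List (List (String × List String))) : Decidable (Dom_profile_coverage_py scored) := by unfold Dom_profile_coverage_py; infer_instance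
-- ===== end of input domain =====

-- B replaces A's three separate scans of `scored` with one pass over three counters (objective: simpler).

-- ===== PORT A =====
-- c.get('matched_profiles') or []  → the matched-profiles list, [] if the key is missing
def pvMP (c : List (String × List String)) : List String :=
  (PySem.Dict.get? (PySem.Dict.mk c) "matched_profiles").getD []

def profile_coverage_py (scored : List (List (String × List String))) : List (String × Int) :=
  -- three generator sums, each its own pass over scored
  let zero : Int := scored.foldl (fun a c => if pvMP c = [] then a + 1 else a) 0
  let single : Int := scored.foldl (fun a c => if (pvMP c).length = 1 then a + 1 else a) 0
  let multi : Int := scored.foldl (fun a c => if (pvMP c).length > 1 then a + 1 else a) 0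
  [("commits_matched_zero_profiles", zero),
   ("commits_matched_one_profile", single),
   ("commits_matched_multiple_profiles", multi)]

-- ===== PORT B =====
-- one pass: a triple of counters, one incremented per commit
def pvBucket (st : Int × Int × Int) (c : List (String × List String)) : Int × Int × Int :=
  let n := ((PySem.Dict.get? (PySem.Dict.mk c) "matched_profiles").getD []).length
  if n = 0 then (st.1 + 1, st.2.1, st.2.2)
  else if n = 1 then (st.1, st.2.1 + 1, st.2.2)
  else (st.1, st.2.1, st.2.2 + 1)

def profile_coverage_py_alt (scored : List (List (String × List String))) : List (String × Int) :=
  let st := scored.foldl pvBucket (0, 0, 0)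
  [("commits_matched_zero_profiles", st.1),
   ("commits_matched_one_profile", st.2.1),
   ("commits_matched_multiple_profiles", st.2.2)]

-- ===== PRECONDITION & SPEC =====
def Spec_profile_coverage_py (scored : List (List (String × List String))) (out : List (String × Int)) : Prop := out = profile_coverage_py_alt scored
instance (scored : List (List (String × List String))) (out : List (String × Int)) : Decidable (Spec_profile_coverage_py scored out) := by unfold Spec_profile_coverage_py; infer_instance

-- ===== CLAIM (what is proved, stated in full; the proofs are below) =====
def Claim_equal_profile_coverage_py : Prop := ∀ (scored : List (List (String × List String))), Dom_profile_coverage_py scored → Spec_profile_coverage_py scored (profile_coverage_py scored)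

-- ===== LEMMAS AND PROOFS =====

-- the single-pass fold computes the three separate folds
theorem pvBucket_foldl (scored : List (List (String × List String))) (z s m : Int) :
    scored.foldl pvBucket (z, s, m) =
      (scored.foldl (fun a c => if pvMP c = [] then a + 1 else a) z,
       scored.foldl (fun a c => if (pvMP c).length = 1 then a + 1 else a) s,
       scored.foldl (fun a c => if (pvMP c).length > 1 then a + 1 else a) m) := by
  induction scored generalizing z s m with
  | nil => rfl
  | cons c rest ih =>
    simp only [List.foldl_cons]
    rw [show List.foldl pvBucket (pvBucket (z, s, m) c) rest
        = List.foldl pvBucket ((pvBucket (z, s, m) c).1, (pvBucket (z, s, m) c).2.1, (pvBucket (z, s, m) c).2.2) rest from rfl]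
    rw [ih]
    unfold pvBucket pvMP
    by_cases h0 : (((PySem.Dict.get? (PySem.Dict.mk c) "matched_profiles").getD []) : List String).length = 0
    · simp [List.length_eq_zero_iff.mp h0]
    · by_cases h1 : (((PySem.Dict.get? (PySem.Dict.mk c) "matched_profiles").getD []) : List String).length = 1
      · have hne : ¬ ((((PySem.Dict.get? (PySem.Dict.mk c) "matched_profiles").getD []) : List String) = []) := by
          intro h; rw [h] at h1; simp at h1
        simp [h1, hne]
      · have hgt : (((PySem.Dict.get? (PySem.Dict.mk c) "matched_profiles").getD []) : List String).length > 1 := by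
          omega
        have hne : ¬ ((((PySem.Dict.get? (PySem.Dict.mk c) "matched_profiles").getD []) : List String) = []) := by
          intro h; rw [h] at h0; simp at h0
        simp [h1, hgt, hne]

-- ===== VERDICT (by name: the statement is the Claim_ definition above) =====
theorem profile_coverage_py_spec : Claim_equal_profile_coverage_py := by
  intro scored _
  unfold Spec_profile_coverage_py profile_coverage_py profile_coverage_py_alt
  rw [pvBucket_foldl]
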